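-- pv_equiv track=rewrite | github.com/ahmedyarub/algorithms | LeetCode/Problems/2/4/2432_the-employee-that-worked-on-the-longest-task.py | hardestWorker
-- ===== SOURCE A (Python) =====
-- from typing import List
--
-- def hardestWorker(n: int, logs: List[List[int]]) -> int:
--     l_time, l_task, i_task = 0, 0, set()
--     for i, t in logs:
--         t_len = t - l_time
--         if t_len > l_task:
--             i_task = {i, }
--             l_task = t_len
--         elif t_len == l_task:
--             i_task.add(i)
--
--         l_time = t
--
--     return min(i_task)
-- ===== SOURCE B (Python) =====
-- def hardestWorker(n, logs):
--     pairs = []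
--     prev = 0
--     for i, t in logs:
--         pairs.append((t - prev, i))
--         prev = t
--     best = max(d for d, _ in pairs)
--     return min(i for d, i in pairs if d == best)
-- ===== Notes on version B (the rewrite author's own statement) =====
-- stated objective: alternative
-- what changed: A maintains a running max duration and a mutable tie-set of worker ids in one incremental scan; B first builds the full (duration, id) table in one pass and then selects the answer in a separate reduction (max of durations, then min id among pairs achieving it).
-- crash fix: On non-empty well-formed logs whose task durations are all negative, A raises ValueError (min() of an empty set, since the tie-set never gets populated past the initial max 0) while B returns the lowest id among the longest (least negative) tasks. — e.g. on hardestWorker(1, [[5, -1], [2, -3]]): A raises ValueError, B returns 5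
import Mathlib
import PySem

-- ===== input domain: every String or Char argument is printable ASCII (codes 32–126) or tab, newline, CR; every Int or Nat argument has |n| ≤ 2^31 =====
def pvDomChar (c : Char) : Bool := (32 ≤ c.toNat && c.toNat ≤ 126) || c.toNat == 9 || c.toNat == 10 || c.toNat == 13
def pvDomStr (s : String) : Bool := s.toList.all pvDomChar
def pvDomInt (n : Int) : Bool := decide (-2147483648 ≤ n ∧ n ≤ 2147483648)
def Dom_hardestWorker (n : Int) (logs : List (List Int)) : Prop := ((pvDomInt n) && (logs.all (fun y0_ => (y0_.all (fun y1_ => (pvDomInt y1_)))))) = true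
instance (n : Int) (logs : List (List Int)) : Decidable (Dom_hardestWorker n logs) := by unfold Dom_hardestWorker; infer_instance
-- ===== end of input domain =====

-- B replaces A's incremental running-max scan with a mutable tie-set by a build-the-(duration,id)-table
-- pass followed by a separate max/min reduction; same cost, different decomposition.

-- ===== PORT A =====
-- the for-loop over logs with state (l_time, l_task, i_task); 'none' = the ValueError of unpacking
-- an entry that is not a pair
def aLoop : List (List Int) → Int × Int × PySem.Set Int → Option (Int × Int × PySem.Set Int)
  | [], st => some st
  | e :: rest, (lTime, lTask, iTask) =>
    match e with
    | [i, t] =>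
      let tLen := t - lTime
      if tLen > lTask then aLoop rest (t, tLen, PySem.Set.ofList [i])
      else if tLen == lTask then aLoop rest (t, lTask, PySem.Set.add iTask i)
      else aLoop rest (t, lTask, iTask)
    | _ => none

def hardestWorker (n : Int) (logs : List (List Int)) : Int :=
  match aLoop logs (0, 0, PySem.Set.ofList []) with
  | some (_, _, iTask) => (PySem.List.min? iTask (fun x => x)).getD 0  -- min(i_task); none = ValueError, excluded by Pre_
  | none => 0

-- ===== PORT B =====
-- the pairs-building loop of Source B; 'none' = the unpacking ValueError
def bPairs : List (List Int) → Int → Option (List (Int × Int))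
  | [], _ => some []
  | e :: rest, prev =>
    match e with
    | [i, t] => (bPairs rest t).map (fun ps => (t - prev, i) :: ps)
    | _ => none

def hardestWorker_alt (n : Int) (logs : List (List Int)) : Int :=
  match bPairs logs 0 with
  | some pairs =>
    match PySem.List.max? (pairs.map Prod.fst) (fun x => x) with   -- max(d for d, _ in pairs)
    | some best =>
        -- min(i for d, i in pairs if d == best); none = ValueError, excluded by Pre_
        (PySem.List.min? ((pairs.filter (fun p => p.1 == best)).map Prod.snd) (fun x => x)).getD 0
    | none => 0
  | none => 0

-- ===== PRECONDITION & SPEC =====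
-- Pre_ excludes exactly the inputs where the Python A raises: an entry that is not a length-2 list
-- (unpacking ValueError), and inputs with no task duration ≥ 0 (then A's tie-set stays empty and
-- min() raises ValueError) — i.e. it requires some end time to be ≥ the previous end time (0 at start).
def Pre_hardestWorker (n : Int) (logs : List (List Int)) : Prop :=
  (∀ e ∈ logs, e.length = 2) ∧
  ∃ pr ∈ (logs.map (fun e => e.getD 1 0)).zip (0 :: logs.map (fun e => e.getD 1 0)), pr.2 ≤ pr.1
instance (n : Int) (logs : List (List Int)) : Decidable (Pre_hardestWorker n logs) := by
  unfold Pre_hardestWorker; infer_instance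

def pvWitness_hardestWorker : Int × List (List Int) := (1, [[0, 3], [1, 5]])

-- On non-empty logs of pairs whose durations are all negative, A raises ValueError (min() of an
-- empty set) while B returns the lowest id among the longest tasks.
def Raises_hardestWorker (n : Int) (logs : List (List Int)) : Prop :=
  logs ≠ [] ∧ (∀ e ∈ logs, e.length = 2) ∧
  ∀ pr ∈ (logs.map (fun e => e.getD 1 0)).zip (0 :: logs.map (fun e => e.getD 1 0)), pr.1 < pr.2
instance (n : Int) (logs : List (List Int)) : Decidable (Raises_hardestWorker n logs) := by
  unfold Raises_hardestWorker; infer_instance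

def pvRaiseWitness_hardestWorker : Int × List (List Int) := (1, [[5, -1], [2, -3]])
def pvRaiseWitnessOut_hardestWorker : Int := 5

def Spec_hardestWorker (n : Int) (logs : List (List Int)) (out : Int) : Prop := out = hardestWorker_alt n logs
instance (n : Int) (logs : List (List Int)) (out : Int) : Decidable (Spec_hardestWorker n logs out) := by unfold Spec_hardestWorker; infer_instance

-- ===== CLAIM (what is proved, stated in full; the proofs are below) =====
def Claim_equal_hardestWorker : Prop := ∀ (n : Int) (logs : List (List Int)), Dom_hardestWorker n logs → Pre_hardestWorker n logs → Spec_hardestWorker n logs (hardestWorker n logs)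

def Claim_raises_hardestWorker : Prop :=
  (∀ (n : Int) (logs : List (List Int)), Dom_hardestWorker n logs → Raises_hardestWorker n logs → ¬ Pre_hardestWorker n logs) ∧
  (Dom_hardestWorker (pvRaiseWitness_hardestWorker.1) (pvRaiseWitness_hardestWorker.2) ∧
   Raises_hardestWorker (pvRaiseWitness_hardestWorker.1) (pvRaiseWitness_hardestWorker.2) ∧
   hardestWorker_alt (pvRaiseWitness_hardestWorker.1) (pvRaiseWitness_hardestWorker.2) = pvRaiseWitnessOut_hardestWorker)

-- ===== LEMMAS AND PROOFS =====

-- proof-side (duration, id) table, total on length-2 entries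
def durs : List (List Int) → Int → List (Int × Int)
  | [], _ => []
  | e :: rest, prev => (e.getD 1 0 - prev, e.getD 0 0) :: durs rest (e.getD 1 0)

lemma two_len_pair {e : List Int} (h : e.length = 2) : ∃ a b, e = [a, b] := by
  match e, h with
  | [a, b], _ => exact ⟨a, b, rfl⟩

lemma bPairs_eq : ∀ (logs : List (List Int)) (prev : Int), (∀ e ∈ logs, e.length = 2) →
    bPairs logs prev = some (durs logs prev) := by
  intro logs
  induction logs with
  | nil => intro prev _; rfl
  | cons e rest ih =>
    intro prev h
    obtain ⟨a, b, rfl⟩ := two_len_pair (h e (by simp))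
    simp [bPairs, durs, ih b (fun e he => h e (by simp [he]))]

lemma foldl_max_eq_or_mem : ∀ (ds : List Int) (L : Int), ds.foldl max L = L ∨ ds.foldl max L ∈ ds := by
  intro ds
  induction ds with
  | nil => intro L; left; rfl
  | cons x t ih =>
    intro L
    rcases ih (max L x) with h | h
    · rcases le_total x L with hx | hx
      · left; rw [List.foldl_cons, h]; omega
      · right; rw [List.foldl_cons, h, max_eq_right hx]; exact List.mem_cons_self ..
    · right; rw [List.foldl_cons]; exact List.mem_cons.2 (Or.inr h)

lemma min?_congr (xs ys : List Int) (hx : xs ≠ []) (hy : ys ≠ [])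
    (h : ∀ x, x ∈ xs ↔ x ∈ ys) :
    PySem.List.min? xs (fun x => x) = PySem.List.min? ys (fun x => x) := by
  cases hmx : PySem.List.min? xs (fun x => x) with
  | none => exact absurd ((PySem.List.min?_eq_none_iff xs _).1 hmx) hx
  | some m1 =>
    cases hmy : PySem.List.min? ys (fun x => x) with
    | none => exact absurd ((PySem.List.min?_eq_none_iff ys _).1 hmy) hy
    | some m2 =>
      have h1 : m1 ∈ xs := PySem.List.min?_mem hmx
      have h2 : m2 ∈ ys := PySem.List.min?_mem hmy
      have le1 := PySem.List.min?_isMin hmx m2 ((h m2).2 h2)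
      have le2 := PySem.List.min?_isMin hmy m1 ((h m1).1 h1)
      simp only [Option.some.injEq]
      omega

-- the loop characterisation: aLoop succeeds, its max is the running max of the durations, and its
-- tie-set holds exactly the initial set (if the max never moved) plus the ids achieving the max
lemma aLoop_char : ∀ (logs : List (List Int)), (∀ e ∈ logs, e.length = 2) →
    ∀ (lt L : Int) (S : PySem.Set Int), ∃ last S',
      aLoop logs (lt, L, S) = some (last, ((durs logs lt).map Prod.fst).foldl max L, S') ∧
      ∀ x, x ∈ S' ↔ ((x ∈ S ∧ ((durs logs lt).map Prod.fst).foldl max L = L) ∨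
                      ∃ p ∈ durs logs lt, p.1 = ((durs logs lt).map Prod.fst).foldl max L ∧ p.2 = x) := by
  intro logs
  induction logs with
  | nil =>
    intro _ lt L S
    exact ⟨lt, S, rfl, by simp [durs]⟩
  | cons e rest ih =>
    intro h lt L S
    obtain ⟨a, b, rfl⟩ := two_len_pair (h e (by simp))
    have hrest : ∀ e ∈ rest, e.length = 2 := fun e he => h e (by simp [he])
    have hdurs : durs ([a, b] :: rest) lt = (b - lt, a) :: durs rest b := by simp [durs]
    rw [hdurs]
    simp only [List.map_cons, List.foldl_cons]
    by_cases hgt : b - lt > L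
    · have hmaxLd : max L (b - lt) = b - lt := by omega
      rw [hmaxLd]
      obtain ⟨last, S', hrun, hmem⟩ := ih hrest b (b - lt) (PySem.Set.ofList [a])
      have hLe : b - lt ≤ ((durs rest b).map Prod.fst).foldl max (b - lt) :=
        (PySem.List.le_foldl_max _ _).1
      refine ⟨last, S', ?_, ?_⟩
      · simp only [aLoop]
        rw [if_pos hgt]
        exact hrun
      · intro x
        constructor
        · intro hx
          rcases (hmem x).1 hx with ⟨hxa, hEq⟩ | ⟨p, hp, h1, h2⟩
          · have hxEq : x = a := by simpa using (PySem.Set.mem_ofList [a] x).1 hxa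
            exact Or.inr ⟨(b - lt, a), List.mem_cons_self .., by omega, hxEq.symm⟩
          · exact Or.inr ⟨p, List.mem_cons.2 (Or.inr hp), h1, h2⟩
        · intro hx
          rcases hx with ⟨_, hEq⟩ | ⟨p, hp, h1, h2⟩
          · omega
          · rcases List.mem_cons.1 hp with rfl | hp
            · refine (hmem x).2 (Or.inl ⟨(PySem.Set.mem_ofList [a] x).2 (by simp [h2.symm]), by omega⟩)
            · exact (hmem x).2 (Or.inr ⟨p, hp, h1, h2⟩)
    · have hmaxLd : max L (b - lt) = L := by omega
      rw [hmaxLd]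
      by_cases heq : b - lt = L
      · obtain ⟨last, S', hrun, hmem⟩ := ih hrest b L (PySem.Set.add S a)
        refine ⟨last, S', ?_, ?_⟩
        · simp only [aLoop]
          rw [if_neg hgt, if_pos (by simp [heq])]
          exact hrun
        · intro x
          constructor
          · intro hx
            rcases (hmem x).1 hx with ⟨hxS, hEq⟩ | ⟨p, hp, h1, h2⟩
            · rcases (PySem.Set.mem_add S a x).1 hxS with hxS | rfl
              · exact Or.inl ⟨hxS, hEq⟩
              · exact Or.inr ⟨(b - lt, x), List.mem_cons_self .., by omega, rfl⟩
            · exact Or.inr ⟨p, List.mem_cons.2 (Or.inr hp), h1, h2⟩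
          · intro hx
            rcases hx with ⟨hxS, hEq⟩ | ⟨p, hp, h1, h2⟩
            · exact (hmem x).2 (Or.inl ⟨(PySem.Set.mem_add S a x).2 (Or.inl hxS), hEq⟩)
            · rcases List.mem_cons.1 hp with rfl | hp
              · exact (hmem x).2 (Or.inl ⟨(PySem.Set.mem_add S a x).2 (Or.inr h2.symm), by omega⟩)
              · exact (hmem x).2 (Or.inr ⟨p, hp, h1, h2⟩)
      · obtain ⟨last, S', hrun, hmem⟩ := ih hrest b L S
        have hLe : L ≤ ((durs rest b).map Prod.fst).foldl max L := (PySem.List.le_foldl_max _ _).1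
        refine ⟨last, S', ?_, ?_⟩
        · simp only [aLoop]
          rw [if_neg hgt, if_neg (by simp [heq])]
          exact hrun
        · intro x
          constructor
          · intro hx
            rcases (hmem x).1 hx with ⟨hxS, hEq⟩ | ⟨p, hp, h1, h2⟩
            · exact Or.inl ⟨hxS, hEq⟩
            · exact Or.inr ⟨p, List.mem_cons.2 (Or.inr hp), h1, h2⟩
          · intro hx
            rcases hx with ⟨hxS, hEq⟩ | ⟨p, hp, h1, h2⟩
            · exact (hmem x).2 (Or.inl ⟨hxS, hEq⟩)
            · rcases List.mem_cons.1 hp with rfl | hp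
              · omega
              · exact (hmem x).2 (Or.inr ⟨p, hp, h1, h2⟩)

-- the duration table's first components are exactly the end-time differences Pre_ talks about
lemma durs_fst : ∀ (logs : List (List Int)) (prev : Int),
    (durs logs prev).map Prod.fst
      = ((logs.map (fun e => e.getD 1 0)).zip (prev :: logs.map (fun e => e.getD 1 0))).map
          (fun pr => pr.1 - pr.2) := by
  intro logs
  induction logs with
  | nil => intro prev; rfl
  | cons e rest ih =>
    intro prev
    simp only [durs, List.map_cons, List.zip_cons_cons, ih (e.getD 1 0)]

-- ===== VERDICT (by name: the statement is the Claim_ definition above) =====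
theorem hardestWorker_spec : Claim_equal_hardestWorker := by
  intro n logs _ hpre
  obtain ⟨hlen, pr, hprmem, hprle⟩ := hpre
  unfold Spec_hardestWorker hardestWorker hardestWorker_alt
  obtain ⟨last, S', hrun, hmem⟩ := aLoop_char logs hlen 0 0 (PySem.Set.ofList [])
  set ps := durs logs 0 with hps
  set ds := ps.map Prod.fst with hds
  set M := ds.foldl max 0 with hMdef
  -- some duration is ≥ 0
  have hex : ∃ dd ∈ ds, 0 ≤ dd := by
    refine ⟨pr.1 - pr.2, ?_, by omega⟩
    rw [hds, hps, durs_fst]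
    exact List.mem_map.2 ⟨pr, hprmem, rfl⟩
  obtain ⟨d0, hd0mem, hd0⟩ := hex
  -- M is attained in ds
  have hMmem : M ∈ ds := by
    rcases foldl_max_eq_or_mem ds 0 with h0 | h
    · have hle := (PySem.List.le_foldl_max ds (0 : Int)).2 d0 hd0mem
      have : d0 = M := by omega
      exact this ▸ hd0mem
    · exact h
  obtain ⟨p0, hp0mem, hp0⟩ := List.mem_map.1 (hds ▸ hMmem)
  -- B's max
  cases hmax : PySem.List.max? ds (fun x => x) with
  | none =>
    have := (PySem.List.max?_eq_none_iff ds _).1 hmax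
    rw [this] at hMmem; exact absurd hMmem (List.not_mem_nil)
  | some best =>
    have hbM : best = M := by
      have h1 := PySem.List.max?_isMax hmax M hMmem
      have h2 := (PySem.List.le_foldl_max ds (0 : Int)).2 best (PySem.List.max?_mem hmax)
      omega
    -- the two candidate lists have the same members
    have hsame : ∀ x, x ∈ (S' : List Int) ↔ x ∈ (ps.filter (fun p => p.1 == best)).map Prod.snd := by
      intro x
      rw [hmem x]
      simp only [List.mem_map, List.mem_filter, beq_iff_eq, hbM]
      constructor
      · rintro (⟨hxe, _⟩ | ⟨p, hp, h1, h2⟩)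
        · have := (PySem.Set.mem_ofList [] x).1 hxe; simp at this
        · exact ⟨p, ⟨hp, h1⟩, h2⟩
      · rintro ⟨p, ⟨hp, h1⟩, h2⟩
        exact Or.inr ⟨p, hp, h1, h2⟩
    have hyne : (ps.filter (fun p => p.1 == best)).map Prod.snd ≠ [] := by
      have : p0.2 ∈ (ps.filter (fun p => p.1 == best)).map Prod.snd := by
        simp only [List.mem_map, List.mem_filter, beq_iff_eq, hbM]
        exact ⟨p0, ⟨hp0mem, hp0⟩, rfl⟩
      exact List.ne_nil_of_mem this
    have hxne : (S' : List Int) ≠ [] :=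
      List.ne_nil_of_mem ((hsame p0.2).2 (by
        simp only [List.mem_map, List.mem_filter, beq_iff_eq, hbM]
        exact ⟨p0, ⟨hp0mem, hp0⟩, rfl⟩))
    have hminEq := min?_congr _ _ hxne hyne hsame
    simp only [hrun, bPairs_eq logs 0 hlen, ← hps, ← hds, hmax, hminEq]

theorem hardestWorker_raises : Claim_raises_hardestWorker := by
  unfold Claim_raises_hardestWorker
  constructor
  · rintro n logs _ ⟨hne, hlen, hall⟩ ⟨_, pr, hprmem, hprle⟩
    exact absurd hprle (by have := hall pr hprmem; omega)
  · exact ⟨by decide, by decide, by decide⟩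

-- self-check: the raise-witness really lies in the raise region (reads hardestWorker_raises)
theorem pvRaiseWitness_ok :
    Raises_hardestWorker pvRaiseWitness_hardestWorker.1 pvRaiseWitness_hardestWorker.2 :=
  hardestWorker_raises.2.2.1
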